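-- pv_equiv track=rewrite | github.com/slxiao/python-selected-topics | python-contest/largeadd/largeadd.py | large_sum_neg
-- ===== SOURCE A (Python) =====
-- def large_sum_neg(a, b):
--     b = '0'*(len(a)-len(b)) + b
--     s = ''
--     decrease = 0
--     for i in range(len(a)-1, -1, -1):
--         if int(a[i])-decrease >= int(b[i]):
--             s = str(int(a[i])-int(b[i])-decrease) + s
--             decrease = 0
--         else:
--             s = str(10+int(a[i])-int(b[i])-decrease) + s
--             decrease = 1
--     return s
-- ===== SOURCE B (Python) =====
-- def large_sum_neg(a, b):
--     # Subtract digit strings by nine's-complement addition: a + (9's complement of b) + 1,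
--     # keeping the low len(a) digits; the carry arithmetic replaces any borrow logic.
--     b = b.zfill(len(a))
--     carry = 1
--     digits = []
--     for x, y in zip(reversed(a), reversed(b)):
--         d = int(x) + (9 - int(y)) + carry
--         digits.append(str(d % 10))
--         carry = d // 10
--     return ''.join(reversed(digits))
-- ===== Notes on version B (the rewrite author's own statement) =====
-- stated objective: alternative
-- what changed: A subtracts digit-wise with an explicit borrow flag and a two-way branch, prepending to the result string; B instead adds a to the nine's-complement of b plus 1 (classic complement-addition subtraction), a branch-free left-fold with a carry, joining the digits at the end. Pre_ excludes inputs with a non-digit character (A raises ValueError on them) and inputs where b is longer than a, a malformed call for this fixed-width subtraction on which A's use of b's first len(a) characters and B's use of its last len(a) digits are equally accidental.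
-- outside the precondition, e.g. on large_sum_neg('12', '345'): A returns '78', B returns '67'; on large_sum_neg('7', '1x2'): A returns '6', B returns '5'
import Mathlib
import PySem

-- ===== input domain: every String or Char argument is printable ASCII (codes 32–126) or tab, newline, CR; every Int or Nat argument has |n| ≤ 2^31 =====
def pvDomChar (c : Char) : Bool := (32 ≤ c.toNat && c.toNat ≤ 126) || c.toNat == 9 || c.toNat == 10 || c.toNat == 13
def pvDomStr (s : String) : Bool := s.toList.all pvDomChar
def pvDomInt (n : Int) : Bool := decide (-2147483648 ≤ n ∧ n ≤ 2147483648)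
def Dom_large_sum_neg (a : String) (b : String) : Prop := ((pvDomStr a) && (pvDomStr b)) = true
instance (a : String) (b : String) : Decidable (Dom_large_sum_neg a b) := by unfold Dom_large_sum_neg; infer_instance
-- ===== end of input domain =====

-- B replaces A's borrow-flag digit subtraction by nine's-complement addition
-- (a + (10^n - 1 - b) + 1, keep the low n digits): a branch-free carry fold;
-- alternative algorithm, equal return values on all inputs admitted by Pre_.

-- int(c) for a single character (both Pythons call it): total form of PySem.Int.ofChars?,
-- exact under Pre_ (only digit characters are admitted, where int never raises).
def pyDigitA (c : Char) : Int := (PySem.Int.ofChars? [c]).getD 0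

-- ===== PORT A =====

def large_sum_neg (a : String) (b : String) : String :=
  let al := a.toList
  -- b = '0'*(len(a)-len(b)) + b   (Nat subtraction = Python's empty string for a negative count)
  let bl := List.replicate (al.length - b.toList.length) '0' ++ b.toList
  -- for i in range(len(a)-1, -1, -1): …  over state (s, decrease)
  let st := (PySem.List.pyRange ((al.length : Int) - 1) (-1) (-1)).foldl
    (fun (st : List Char × Int) i =>
      if pyDigitA (PySem.List.pyGetD bl i ' ') ≤ pyDigitA (PySem.List.pyGetD al i ' ') - st.2 then
        (PySem.Int.toChars (pyDigitA (PySem.List.pyGetD al i ' ') -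
            pyDigitA (PySem.List.pyGetD bl i ' ') - st.2) ++ st.1, 0)
      else
        (PySem.Int.toChars (10 + pyDigitA (PySem.List.pyGetD al i ' ') -
            pyDigitA (PySem.List.pyGetD bl i ' ') - st.2) ++ st.1, 1))
    ([], 0)
  String.ofList st.1

-- ===== PORT B =====
-- Source B: b = b.zfill(len(a)); then one fold over zip(reversed(a), reversed(b)) with state
-- (digits, carry), d = int(x) + (9 - int(y)) + carry, appending str(d % 10);
-- finally ''.join(reversed(digits)) (digits kept as List (List Char), join = flatten).
def large_sum_neg_alt (a : String) (b : String) : String :=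
  let bl := (PySem.Str.zfill b ((a.toList.length : Int))).toList
  let st := (a.toList.reverse.zip bl.reverse).foldl
    (fun (st : List (List Char) × Int) p =>
      (st.1 ++ [PySem.Int.toChars (PySem.Int.mod (pyDigitA p.1 + (9 - pyDigitA p.2) + st.2) 10)],
       PySem.Int.floordiv (pyDigitA p.1 + (9 - pyDigitA p.2) + st.2) 10))
    ([], 1)
  String.ofList st.1.reverse.flatten

-- ===== PRECONDITION & SPEC =====
-- Pre_ excludes inputs with a non-digit character (A raises ValueError on them) and inputs
-- where b is longer than a, a malformed call for this fixed-width subtraction on which A's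
-- use of b's first len(a) characters and B's use of its last len(a) digits are equally accidental.
def Pre_large_sum_neg (a : String) (b : String) : Prop :=
  ((a.toList.all Char.isDigit = true) ∧ (b.toList.all Char.isDigit = true) ∧
    b.toList.length ≤ a.toList.length) ∨ a.toList = []
instance (a : String) (b : String) : Decidable (Pre_large_sum_neg a b) := by
  unfold Pre_large_sum_neg; infer_instance

def pvWitness_large_sum_neg : String × String := ("1000", "73")

def Spec_large_sum_neg (a : String) (b : String) (out : String) : Prop := out = large_sum_neg_alt a b
instance (a : String) (b : String) (out : String) : Decidable (Spec_large_sum_neg a b out) := by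
  unfold Spec_large_sum_neg; infer_instance

-- ===== CLAIM (what is proved, stated in full; the proofs are below) =====
def Claim_equal_large_sum_neg : Prop := ∀ (a : String) (b : String), Dom_large_sum_neg a b → Pre_large_sum_neg a b → Spec_large_sum_neg a b (large_sum_neg a b)

-- ===== LEMMAS AND PROOFS =====

-- digit value of a digit string, most significant first
def dval (cs : List Char) : Int := cs.foldl (fun acc c => acc * 10 + ((c.toNat : Int) - 48)) 0

-- digit value, least significant first
def dvalR : List Char → Int
  | [] => 0
  | c :: cs => ((c.toNat : Int) - 48) + 10 * dvalR cs

-- least-significant-first decimal digits of m, fixed width k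
def lsd : Nat → Int → List Char
  | 0, _ => []
  | k+1, m => Char.ofNat (48 + m % 10).toNat :: lsd k (m / 10)

lemma digit_bounds (c : Char) (h : c.isDigit = true) : 48 ≤ c.toNat ∧ c.toNat ≤ 57 := by
  simp only [Char.isDigit, decide_eq_true_eq, Bool.and_eq_true, ge_iff_le,
    UInt32.le_iff_toNat_le] at h
  exact h

lemma pyDigitA_eq (c : Char) (h : c.isDigit = true) : pyDigitA c = (c.toNat : Int) - 48 := by
  obtain ⟨h1, h2⟩ := digit_bounds c h
  have hc : c = Char.ofNat c.toNat := (Char.ofNat_toNat c).symm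
  interval_cases hk : c.toNat <;> rw [hc] <;> decide

lemma toChars_digit (d : Int) (h0 : 0 ≤ d) (h9 : d < 10) :
    PySem.Int.toChars d = [Char.ofNat (48 + d).toNat] := by
  interval_cases d <;> decide

lemma dval_go (cs : List Char) : ∀ acc : Int,
    cs.foldl (fun acc c => acc * 10 + ((c.toNat : Int) - 48)) acc
      = acc * 10 ^ cs.length + dval cs := by
  induction cs with
  | nil => intro acc; simp [dval]
  | cons c cs ih =>
    intro acc
    simp only [List.foldl_cons, List.length_cons, dval]
    rw [ih, ih ((0:Int) * 10 + ((c.toNat : Int) - 48))]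
    ring

lemma dval_cons (c : Char) (cs : List Char) :
    dval (c :: cs) = ((c.toNat : Int) - 48) * 10 ^ cs.length + dval cs := by
  show (c :: cs).foldl _ 0 = _
  simp only [List.foldl_cons]
  rw [dval_go]
  ring

lemma dval_bounds (cs : List Char) (h : ∀ c ∈ cs, c.isDigit = true) :
    0 ≤ dval cs ∧ dval cs < 10 ^ cs.length := by
  induction cs with
  | nil => simp [dval]
  | cons c cs ih =>
    obtain ⟨ih1, ih2⟩ := ih (fun x hx => h x (List.mem_cons_of_mem _ hx))
    obtain ⟨h1, h2⟩ := digit_bounds c (h c List.mem_cons_self)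
    have hd : (0:Int) ≤ (c.toNat : Int) - 48 ∧ (c.toNat : Int) - 48 ≤ 9 := by omega
    have hP : (0:Int) < 10 ^ cs.length := by positivity
    rw [dval_cons, List.length_cons, pow_succ]
    constructor
    · nlinarith [hd.1, hd.2]
    · nlinarith [hd.1, hd.2]

lemma dvalR_snoc (xs : List Char) (c : Char) :
    dvalR (xs ++ [c]) = dvalR xs + ((c.toNat : Int) - 48) * 10 ^ xs.length := by
  induction xs with
  | nil => simp [dvalR]
  | cons x xs ih =>
    simp only [List.cons_append, dvalR, ih, List.length_cons]
    ring

lemma dvalR_reverse (cs : List Char) : dvalR cs.reverse = dval cs := by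
  induction cs with
  | nil => simp [dvalR, dval]
  | cons c cs ih =>
    rw [List.reverse_cons, dvalR_snoc, ih, dval_cons, List.length_reverse]
    ring

lemma lsd_snoc (k : Nat) : ∀ m : Int,
    lsd (k+1) m = lsd k m ++ [Char.ofNat (48 + m / 10 ^ k % 10).toNat] := by
  induction k with
  | zero => intro m; simp [lsd]
  | succ k ih =>
    intro m
    show Char.ofNat (48 + m % 10).toNat :: lsd (k+1) (m / 10) = _
    rw [ih (m / 10), Int.ediv_ediv_of_nonneg (by norm_num), ← pow_succ']
    rfl

lemma lsd_addmul (k : Nat) : ∀ (m c : Int), lsd k (m + c * 10 ^ k) = lsd k m := by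
  induction k with
  | zero => intro m c; rfl
  | succ k ih =>
    intro m c
    show Char.ofNat (48 + (m + c * 10 ^ (k+1)) % 10).toNat :: lsd k ((m + c * 10 ^ (k+1)) / 10)
        = Char.ofNat (48 + m % 10).toNat :: lsd k (m / 10)
    have e1 : m + c * 10 ^ (k+1) = m + 10 * (c * 10 ^ k) := by ring
    have e2 : m + c * 10 ^ (k+1) = m + (c * 10 ^ k) * 10 := by ring
    rw [e1, Int.add_mul_emod_self_left, ← e1, e2, Int.add_mul_ediv_right _ _ (by norm_num : (10:Int) ≠ 0), ih]

lemma rng2 {σ : Type} (g : Char → Char → σ → σ) (d₁ d₂ : Char) (xs : List Char) :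
    ∀ (ys : List Char) (init : σ), xs.length ≤ ys.length →
    (List.range xs.length).foldr (fun i st => g (xs.getD i d₁) (ys.getD i d₂) st) init
      = (xs.zip ys).foldr (fun p st => g p.1 p.2 st) init := by
  induction xs with
  | nil => intro ys init _; simp
  | cons x xs ih =>
    intro ys init hlen
    cases ys with
    | nil => simp at hlen
    | cons y ys =>
      simp only [List.length_cons, List.range_succ_eq_map, List.foldr_cons, List.foldr_map,
        List.getD_cons_zero, List.getD_cons_succ, List.zip_cons_cons, Nat.succ_eq_add_one]
      rw [ih ys _ (by simpa using hlen)]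

lemma invA (z : List (Char × Char)) (hz : ∀ p ∈ z, p.1.isDigit = true ∧ p.2.isDigit = true) :
    z.foldr (fun p (st : List Char × Int) =>
        if pyDigitA p.2 ≤ pyDigitA p.1 - st.2 then
          (PySem.Int.toChars (pyDigitA p.1 - pyDigitA p.2 - st.2) ++ st.1, 0)
        else
          (PySem.Int.toChars (10 + pyDigitA p.1 - pyDigitA p.2 - st.2) ++ st.1, 1))
      ([], 0)
      = ((lsd z.length ((dval (z.map Prod.fst) - dval (z.map Prod.snd)) % 10 ^ z.length)).reverse,
         if dval (z.map Prod.fst) < dval (z.map Prod.snd) then 1 else 0) := by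
  induction z with
  | nil => simp [lsd, dval]
  | cons p z ih =>
    obtain ⟨hdx, hdy⟩ := hz p List.mem_cons_self
    have ih' := ih (fun q hq => hz q (List.mem_cons_of_mem _ hq))
    set k := z.length with hk
    set X := dval (z.map Prod.fst) with hX
    set Y := dval (z.map Prod.snd) with hY
    have hXb : 0 ≤ X ∧ X < 10 ^ k := by
      have := dval_bounds (z.map Prod.fst) (by
        intro c hc; obtain ⟨q, hq, rfl⟩ := List.mem_map.mp hc; exact (hz q (List.mem_cons_of_mem _ hq)).1)
      simpa [hk] using this
    have hYb : 0 ≤ Y ∧ Y < 10 ^ k := by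
      have := dval_bounds (z.map Prod.snd) (by
        intro c hc; obtain ⟨q, hq, rfl⟩ := List.mem_map.mp hc; exact (hz q (List.mem_cons_of_mem _ hq)).2)
      simpa [hk] using this
    have hP : (0:Int) < 10 ^ k := by positivity
    set dx : Int := (p.1.toNat : Int) - 48 with hdx'
    set dy : Int := (p.2.toNat : Int) - 48 with hdy'
    have hdxb : 0 ≤ dx ∧ dx ≤ 9 := by have := digit_bounds p.1 hdx; omega
    have hdyb : 0 ≤ dy ∧ dy ≤ 9 := by have := digit_bounds p.2 hdy; omega
    set dec : Int := if X < Y then 1 else 0 with hdec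
    have hdecb : 0 ≤ dec ∧ dec ≤ 1 := by rw [hdec]; split <;> omega
    set m : Int := (X - Y) % 10 ^ k with hm
    have hmb : 0 ≤ m ∧ m < 10 ^ k :=
      ⟨Int.emod_nonneg _ (by positivity), Int.emod_lt_of_pos _ hP⟩
    have hF : X - Y = m - dec * 10 ^ k := by
      by_cases hlt : X < Y
      · have h1 : m = X - Y + 10 ^ k := by
          rw [hm]
          have h2 := Int.add_mul_emod_self_left (X - Y) (10 ^ k) 1
          rw [mul_one] at h2
          rw [← h2, Int.emod_eq_of_lt (by omega) (by omega)]
        rw [hdec, if_pos hlt]; omega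
      · have h1 : m = X - Y := by rw [hm, Int.emod_eq_of_lt (by omega) (by omega)]
        rw [hdec, if_neg hlt]; omega
    have hXc : dval ((p :: z).map Prod.fst) = dx * 10 ^ k + X := by
      simp only [List.map_cons, dval_cons, List.length_map]
      rfl
    have hYc : dval ((p :: z).map Prod.snd) = dy * 10 ^ k + Y := by
      simp only [List.map_cons, dval_cons, List.length_map]
      rfl
    have hP1 : (10:Int) ^ (k+1) = 10 * 10 ^ k := by rw [pow_succ]; ring
    simp only [List.foldr_cons, ih', List.length_cons, hXc, hYc, ← hk]
    rw [pyDigitA_eq p.1 hdx, pyDigitA_eq p.2 hdy, ← hdx', ← hdy']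
    have key : dx * 10 ^ k + X - (dy * 10 ^ k + Y) = (dx - dy - dec) * 10 ^ k + m := by
      linear_combination hF
    clear_value dec m
    by_cases hbr : dy ≤ dx - dec
    · rw [if_pos hbr]
      set dd : Int := dx - dy - dec with hdd
      have hddb : 0 ≤ dd ∧ dd ≤ 9 := by omega
      have t0 : 0 ≤ dd * 10 ^ k := mul_nonneg hddb.1 hP.le
      have t9 : dd * 10 ^ k ≤ 9 * 10 ^ k := mul_le_mul_of_nonneg_right hddb.2 hP.le
      have hrange : 0 ≤ dd * 10 ^ k + m ∧ dd * 10 ^ k + m < 10 ^ (k+1) := by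
        rw [hP1]; constructor
        · linarith [hmb.1]
        · linarith [hmb.2]
      have hmod : (dx * 10 ^ k + X - (dy * 10 ^ k + Y)) % 10 ^ (k+1) = dd * 10 ^ k + m := by
        rw [key, Int.emod_eq_of_lt hrange.1 hrange.2]
      have hge : ¬ (dx * 10 ^ k + X < dy * 10 ^ k + Y) := by
        push Not
        linarith [key, hmb.1, t0]
      rw [hmod, if_neg hge]
      refine Prod.ext ?_ rfl
      show PySem.Int.toChars dd ++ (lsd k m).reverse = (lsd (k+1) (dd * 10 ^ k + m)).reverse
      rw [toChars_digit dd hddb.1 (by omega), lsd_snoc,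
        show dd * 10 ^ k + m = m + dd * 10 ^ k by ring, lsd_addmul,
        Int.add_mul_ediv_right _ _ (by positivity : (10:Int) ^ k ≠ 0),
        Int.ediv_eq_zero_of_lt hmb.1 hmb.2, zero_add,
        Int.emod_eq_of_lt hddb.1 (by omega)]
      simp
    · rw [if_neg hbr]
      set dd : Int := 10 + dx - dy - dec with hdd
      have hddb : 0 ≤ dd ∧ dd ≤ 9 := by omega
      have t0 : 0 ≤ dd * 10 ^ k := mul_nonneg hddb.1 hP.le
      have t9 : dd * 10 ^ k ≤ 9 * 10 ^ k := mul_le_mul_of_nonneg_right hddb.2 hP.le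
      have t2 : dd * 10 ^ k = (dx - dy - dec) * 10 ^ k + 10 * 10 ^ k := by rw [hdd]; ring
      have hrange : 0 ≤ dd * 10 ^ k + m ∧ dd * 10 ^ k + m < 10 ^ (k+1) := by
        rw [hP1]; constructor
        · linarith [hmb.1]
        · linarith [hmb.2]
      have hval : dx * 10 ^ k + X - (dy * 10 ^ k + Y) = dd * 10 ^ k + m - 10 ^ (k+1) := by
        rw [hP1]; linarith [key, t2]
      have hmod : (dx * 10 ^ k + X - (dy * 10 ^ k + Y)) % 10 ^ (k+1) = dd * 10 ^ k + m := by
        have h2 := Int.add_mul_emod_self_left (dx * 10 ^ k + X - (dy * 10 ^ k + Y)) ((10:Int) ^ (k+1)) 1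
        rw [mul_one] at h2
        rw [← h2, hval,
          show dd * 10 ^ k + m - 10 ^ (k+1) + 10 ^ (k+1) = dd * 10 ^ k + m by ring,
          Int.emod_eq_of_lt hrange.1 hrange.2]
      have he : dx - dy - dec ≤ -1 := by omega
      have t1 : (dx - dy - dec) * 10 ^ k ≤ -1 * 10 ^ k := mul_le_mul_of_nonneg_right he hP.le
      have hlt : dx * 10 ^ k + X < dy * 10 ^ k + Y := by
        have := hmb.2
        linarith [key, t1]
      rw [hmod, if_pos hlt]
      refine Prod.ext ?_ rfl
      show PySem.Int.toChars dd ++ (lsd k m).reverse = (lsd (k+1) (dd * 10 ^ k + m)).reverse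
      rw [toChars_digit dd hddb.1 (by omega), lsd_snoc,
        show dd * 10 ^ k + m = m + dd * 10 ^ k by ring, lsd_addmul,
        Int.add_mul_ediv_right _ _ (by positivity : (10:Int) ^ k ≠ 0),
        Int.ediv_eq_zero_of_lt hmb.1 hmb.2, zero_add,
        Int.emod_eq_of_lt hddb.1 (by omega)]
      simp

-- B's complement-addition fold, lsd-first over the reversed zip
lemma invB (z : List (Char × Char)) (hz : ∀ p ∈ z, p.1.isDigit = true ∧ p.2.isDigit = true) :
    ∀ (acc : List (List Char)) (c : Int), 0 ≤ c → c ≤ 1 →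
    z.foldl
      (fun (st : List (List Char) × Int) p =>
        (st.1 ++ [PySem.Int.toChars (PySem.Int.mod (pyDigitA p.1 + (9 - pyDigitA p.2) + st.2) 10)],
         PySem.Int.floordiv (pyDigitA p.1 + (9 - pyDigitA p.2) + st.2) 10))
      (acc, c)
      = (acc ++ (lsd z.length (dvalR (z.map Prod.fst) - dvalR (z.map Prod.snd) + c - 1 + 10 ^ z.length)).map (fun ch => [ch]),
         (dvalR (z.map Prod.fst) - dvalR (z.map Prod.snd) + c - 1 + 10 ^ z.length) / 10 ^ z.length) := by
  induction z with
  | nil =>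
    intro acc c h0 h1
    simp only [List.foldl_nil, List.map_nil, List.length_nil, pow_zero, Int.ediv_one, lsd,
      List.map_nil, List.append_nil, dvalR]
    have : (0:Int) - 0 + c - 1 + 1 = c := by ring
    rw [this]
  | cons p rest ih =>
    intro acc c h0 h1
    obtain ⟨hpx, hpy⟩ := hz p List.mem_cons_self
    have ih' := ih (fun q hq => hz q (List.mem_cons_of_mem _ hq))
    obtain ⟨hx1, hx2⟩ := digit_bounds p.1 hpx
    obtain ⟨hy1, hy2⟩ := digit_bounds p.2 hpy
    simp only [List.foldl_cons]
    rw [pyDigitA_eq p.1 hpx, pyDigitA_eq p.2 hpy]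
    set d : Int := ((p.1.toNat : Int) - 48) + (9 - ((p.2.toNat : Int) - 48)) + c with hdd
    have hdb : 0 ≤ d ∧ d ≤ 19 := by omega
    rw [PySem.Int.mod_eq_emod_of_pos (by norm_num : (0:Int) < 10),
        PySem.Int.floordiv_eq_ediv_of_pos (by norm_num : (0:Int) < 10),
        toChars_digit (d % 10) (Int.emod_nonneg d (by norm_num)) (Int.emod_lt_of_pos d (by norm_num)),
        ih' _ (d / 10) (Int.ediv_nonneg hdb.1 (by norm_num)) (by omega)]
    simp only [List.length_cons, List.map_cons, dvalR]
    set k := rest.length with hk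
    set X' := dvalR (rest.map Prod.fst) with hX'
    set Y' := dvalR (rest.map Prod.snd) with hY'
    have hS : ((p.1.toNat : Int) - 48) + 10 * X' - (((p.2.toNat : Int) - 48) + 10 * Y') + c - 1
          + 10 ^ (k + 1)
        = d + (X' - Y' - 1 + 10 ^ k) * 10 := by
      rw [pow_succ, hdd]; ring
    rw [hS]
    have hSm : (d + (X' - Y' - 1 + 10 ^ k) * 10) % 10 = d % 10 := Int.add_mul_emod_self_right d (X' - Y' - 1 + 10 ^ k) 10
    have hSd : (d + (X' - Y' - 1 + 10 ^ k) * 10) / 10 = X' - Y' + d / 10 - 1 + 10 ^ k := by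
      rw [Int.add_mul_ediv_right _ _ (by norm_num : (10:Int) ≠ 0)]; ring
    have hlsd : lsd (k + 1) (d + (X' - Y' - 1 + 10 ^ k) * 10)
        = Char.ofNat (48 + d % 10).toNat :: lsd k (X' - Y' + d / 10 - 1 + 10 ^ k) := by
      rw [lsd, hSm, hSd]
    refine Prod.ext ?_ ?_
    · show acc ++ [[Char.ofNat (48 + d % 10).toNat]]
          ++ (lsd k (X' - Y' + d / 10 - 1 + 10 ^ k)).map (fun ch => [ch]) = _
      rw [hlsd, List.map_cons, List.append_assoc]
      rfl
    · show (X' - Y' + d / 10 - 1 + 10 ^ k) / 10 ^ k = _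
      rw [pow_succ', ← Int.ediv_ediv_of_nonneg (by norm_num : (0:Int) ≤ 10), hSd]

lemma zip_reverse (xs : List Char) (ys : List Char) (h : xs.length = ys.length) :
    xs.reverse.zip ys.reverse = (xs.zip ys).reverse := by
  simp [List.zip, List.reverse_zipWith h]

-- zfill under Pre_: same padding as A's '0'*(len(a)-len(b)) + b
lemma zfill_digits (bs : List Char) (n : Nat) (hlen : bs.length ≤ n)
    (hd : ∀ c ∈ bs, c.isDigit = true) :
    PySem.Chars.zfill bs (n : Int) = List.replicate (n - bs.length) '0' ++ bs := by
  unfold PySem.Chars.zfill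
  by_cases hw : (n : Int) ≤ (bs.length : Int)
  · have he : bs.length = n := le_antisymm hlen (by exact_mod_cast hw)
    rw [if_pos hw, he, Nat.sub_self]
    simp
  · rw [if_neg hw]
    cases bs with
    | nil => simp
    | cons c rest =>
      have hc := digit_bounds c (hd c List.mem_cons_self)
      have hne : ¬(c = '+' ∨ c = '-') := by rintro (rfl | rfl) <;> revert hc <;> decide
      simp [hne]

lemma flatten_map_singleton (l : List Char) : (l.map (fun c => [c])).flatten = l := by
  induction l with
  | nil => rfl
  | cons c l ih => simp [ih]

lemma large_sum_neg_eq (a b : String) (ha : ∀ c ∈ a.toList, c.isDigit = true)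
    (hb : ∀ c ∈ b.toList, c.isDigit = true) (hlen : b.toList.length ≤ a.toList.length) :
    large_sum_neg a b = large_sum_neg_alt a b := by
  simp only [large_sum_neg, large_sum_neg_alt]
  set al := a.toList with hal
  set n := al.length with hn
  -- B's zfill produces exactly A's '0'-padding
  have hbl : (PySem.Str.zfill b ((n : Nat) : Int)).toList
      = List.replicate (n - b.toList.length) '0' ++ b.toList := by
    rw [PySem.Str.toList_zfill]
    exact zfill_digits b.toList n hlen hb
  rw [hbl]
  set bl := List.replicate (n - b.toList.length) '0' ++ b.toList with hbldef
  have hbllen : bl.length = n := by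
    rw [hbldef]; simp only [List.length_append, List.length_replicate]; omega
  have hbb : ∀ c ∈ bl, c.isDigit = true := by
    intro c hc
    rw [hbldef] at hc
    rcases List.mem_append.mp hc with h1 | h1
    · rcases List.eq_of_mem_replicate h1 with rfl; decide
    · exact hb c h1
  -- A side → foldr over the zip, then invA
  rw [PySem.List.pyRange_neg_one_eq_reverse]
  rw [show ((-1:Int) + 1) = 0 by ring, show ((n:Int) - 1 + 1) = (n:Int) by ring]
  rw [List.foldl_reverse, PySem.List.pyRange_zero_nat, List.foldr_map]
  simp only [PySem.List.pyGetD_natCast]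
  rw [rng2 (fun x y st => if pyDigitA y ≤ pyDigitA x - st.2 then
        (PySem.Int.toChars (pyDigitA x - pyDigitA y - st.2) ++ st.1, (0:Int))
      else
        (PySem.Int.toChars (10 + pyDigitA x - pyDigitA y - st.2) ++ st.1, 1)) ' ' ' ' al bl ([], 0)
      (le_of_eq hbllen.symm)]
  have hzdig : ∀ p ∈ al.zip bl, p.1.isDigit = true ∧ p.2.isDigit = true := by
    intro p hp
    obtain ⟨h1, h2⟩ := List.of_mem_zip hp
    exact ⟨ha _ h1, hbb _ h2⟩
  rw [invA _ hzdig]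
  have hzlen : (al.zip bl).length = n := by rw [List.length_zip, hbllen]; omega
  have hmf : (al.zip bl).map Prod.fst = al := List.map_fst_zip (le_of_eq hbllen.symm)
  have hms : (al.zip bl).map Prod.snd = bl := List.map_snd_zip (le_of_eq hbllen)
  rw [hmf, hms, hzlen]
  -- B side → invB over the reversed zip
  rw [zip_reverse al bl hbllen.symm,
    invB ((al.zip bl).reverse)
      (fun p hp => hzdig p (List.mem_reverse.mp hp)) [] 1 (by norm_num) (le_refl 1)]
  simp only [List.map_reverse, hmf, hms, List.length_reverse, hzlen, dvalR_reverse,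
    List.nil_append]
  set X := dval al
  set Y := dval bl
  have hsum : X - Y + 1 - 1 + 10 ^ n = (X - Y) % 10 ^ n + ((X - Y) / 10 ^ n + 1) * 10 ^ n := by
    have h := Int.mul_ediv_add_emod (X - Y) (10 ^ n)
    linarith
  rw [hsum, lsd_addmul, ← List.map_reverse, flatten_map_singleton]

-- on empty a both programs run their (empty) loop zero times and return ''
lemma large_sum_neg_empty (a b : String) (h : a.toList = []) :
    large_sum_neg a b = large_sum_neg_alt a b := by
  simp only [large_sum_neg, large_sum_neg_alt, h, List.length_nil, List.reverse_nil,
    List.zip_nil_left, List.foldl_nil, Nat.cast_zero, zero_sub]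
  rw [show PySem.List.pyRange (-1) (-1) (-1) = [] from rfl]
  rfl

-- ===== VERDICT (by name: the statement is the Claim_ definition above) =====
theorem large_sum_neg_spec : Claim_equal_large_sum_neg := by
  intro a b _ hpre
  unfold Spec_large_sum_neg
  rcases hpre with hpre | hnil
  · exact large_sum_neg_eq a b (fun c hc => List.all_eq_true.mp hpre.1 c hc)
      (fun c hc => List.all_eq_true.mp hpre.2.1 c hc) hpre.2.2
  · exact large_sum_neg_empty a b hnil
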